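-- pv_equiv track=rewrite | github.com/kolonialno/oida | oida/config.py | get_rule_for_violation
-- ===== SOURCE A (Python) =====
-- from typing import Iterable
--
-- def get_rule_for_violation(
--     allowed_imports: Iterable[str], violation: str
-- ) -> str | None:
--
--     # Try to find a whilecard covering the violation first
--     path = violation.split(".")
--     while path:
--         wildcard = ".".join(path[:-1]) + ".*"
--         if wildcard in allowed_imports:
--             return wildcard
--
--         path = path[:-1]
--
--     # Fall back to an explicit exclude
--     return violation if violation in allowed_imports else None
-- ===== SOURCE B (Python) =====
-- def get_rule_for_violation(allowed_imports, violation):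
--     # Materialize the iterable once, then scan the rules instead of
--     # enumerating the violation's prefixes: a wildcard rule "stem.*"
--     # matches iff stem is empty or "stem." is a prefix of the violation
--     # (i.e. stem is a proper dotted prefix); keep the longest such stem.
--     rules = list(allowed_imports)
--     best = None
--     for r in rules:
--         if r.endswith(".*"):
--             stem = r[:-2]
--             if stem == "" or violation.startswith(stem + "."):
--                 if best is None or len(stem) > len(best):
--                     best = stem
--     if best is not None:
--         return best + ".*"
--     return violation if violation in rules else None
-- ===== Notes on version B (the rewrite author's own statement) =====
-- stated objective: alternative
-- what changed: Instead of enumerating the violation's dotted prefixes from longest to shortest and probing each candidate wildcard against the rule collection, B materializes the rules once and makes a single pass over them, keeping the longest wildcard stem that is empty or a proper dotted prefix of the violation.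
import Mathlib
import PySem

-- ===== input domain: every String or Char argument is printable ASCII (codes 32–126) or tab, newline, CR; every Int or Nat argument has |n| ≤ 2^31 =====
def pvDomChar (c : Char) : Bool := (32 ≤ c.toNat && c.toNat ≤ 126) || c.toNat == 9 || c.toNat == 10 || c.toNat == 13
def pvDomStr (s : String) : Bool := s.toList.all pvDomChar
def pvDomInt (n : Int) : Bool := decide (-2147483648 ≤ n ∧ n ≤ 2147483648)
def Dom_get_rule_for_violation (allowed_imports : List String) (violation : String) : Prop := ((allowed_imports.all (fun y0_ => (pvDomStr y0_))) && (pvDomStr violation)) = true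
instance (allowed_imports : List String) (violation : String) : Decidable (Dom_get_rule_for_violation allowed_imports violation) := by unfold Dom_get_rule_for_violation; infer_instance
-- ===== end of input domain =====

-- B replaces A's longest-prefix-first probing of candidate wildcards by a single scan of the
-- rule list that keeps the longest matching wildcard stem (objective: alternative decomposition).

-- ===== PORT A =====
-- the 'while path:' loop; returning from inside the loop = 'some', falling through = 'none'
def pvAWhile (allowed_imports : List String) (path : List String) : Option String :=
  if h : path = [] then none
  else
    let wildcard := PySem.Str.join "." (PySem.List.slice path none (some (-1))) ++ ".*"
    if allowed_imports.contains wildcard then some wildcard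
    else pvAWhile allowed_imports (PySem.List.slice path none (some (-1)))
termination_by path.length
decreasing_by
  rw [PySem.List.slice_to_neg_one]
  cases path with
  | nil => exact absurd rfl h
  | cons a t => simp

def get_rule_for_violation (allowed_imports : List String) (violation : String) : Option String :=
  -- violation.split("."): the separator is the literal ".", so split? is always 'some'
  match pvAWhile allowed_imports ((PySem.Str.split? violation ".").getD []) with
  | some w => some w
  | none => if allowed_imports.contains violation then some violation else none

-- ===== PORT B =====
-- body of 'for r in rules:' updating 'best'
def pvBStep (violation : String) (best : Option String) (r : String) : Option String :=
  if PySem.Str.endswith r ".*" then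
    let stem := PySem.Str.slice r none (some (-2))
    if stem = "" ∨ PySem.Str.startswith violation (stem ++ ".") then
      match best with
      | none => some stem
      | some b => if PySem.Str.len b < PySem.Str.len stem then some stem else some b
    else best
  else best

def get_rule_for_violation_alt (allowed_imports : List String) (violation : String) : Option String :=
  -- rules = list(allowed_imports) is the identity on a Lean list
  match allowed_imports.foldl (pvBStep violation) none with
  | some best => some (best ++ ".*")
  | none => if allowed_imports.contains violation then some violation else none

-- ===== PRECONDITION & SPEC =====
def Spec_get_rule_for_violation (allowed_imports : List String) (violation : String) (out : Option String) : Prop := out = get_rule_for_violation_alt allowed_imports violation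
instance (allowed_imports : List String) (violation : String) (out : Option String) : Decidable (Spec_get_rule_for_violation allowed_imports violation out) := by unfold Spec_get_rule_for_violation; infer_instance

-- ===== CLAIM (what is proved, stated in full; the proofs are below) =====
def Claim_equal_get_rule_for_violation : Prop := ∀ (allowed_imports : List String) (violation : String), Dom_get_rule_for_violation allowed_imports violation → Spec_get_rule_for_violation allowed_imports violation (get_rule_for_violation allowed_imports violation)

-- ===== LEMMAS AND PROOFS =====

-- A simple structural description of splitting on '.' (proof-side only)
def pvSp : List Char → List Char × List (List Char)
  | [] => ([], [])
  | c :: rest =>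
    let r := pvSp rest
    if c = '.' then ([], r.1 :: r.2) else (c :: r.1, r.2)

def pvParts (v : List Char) : List (List Char) := (pvSp v).1 :: (pvSp v).2

lemma pvGo_eq : ∀ (fuel : Nat) (l cur : List Char) (acc : List (List Char)), l.length < fuel →
    PySem.Chars.splitOn.go ['.'] fuel l cur acc = acc.reverse ++ (cur.reverse ++ (pvSp l).1) :: (pvSp l).2 := by
  intro fuel
  induction fuel with
  | zero => intro l cur acc h; omega
  | succ fuel ih =>
    intro l cur acc h
    cases l with
    | nil => simp [PySem.Chars.splitOn.go, pvSp]
    | cons c rest =>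
      by_cases hc : c = '.'
      · subst hc
        rw [PySem.Chars.splitOn.go]
        simp only [List.isPrefixOf, beq_self_eq_true, Bool.true_and, if_true,
          List.length_cons, List.length_nil, List.drop_succ_cons, List.drop_zero]
        rw [ih rest [] ((cur.reverse) :: acc) (by simpa using Nat.lt_of_succ_lt_succ h)]
        simp [pvSp]
      · rw [PySem.Chars.splitOn.go]
        have : (['.'].isPrefixOf (c :: rest)) = false := by
          simp [List.isPrefixOf]; exact fun hh => absurd hh.symm hc
        simp only [this, Bool.false_eq_true, if_false]
        rw [ih rest (c :: cur) acc (by simpa using Nat.lt_of_succ_lt_succ h)]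
        simp [pvSp, hc]

lemma pvSplitOn_eq (v : List Char) : PySem.Chars.splitOn v ['.'] = pvParts v := by
  unfold PySem.Chars.splitOn
  rw [pvGo_eq (v.length + 1) v [] [] (by omega)]
  simp [pvParts]

lemma pvNoDot (v : List Char) : '.' ∉ (pvSp v).1 ∧ ∀ p ∈ (pvSp v).2, '.' ∉ p := by
  induction v with
  | nil => simp [pvSp]
  | cons c rest ih =>
    by_cases hc : c = '.'
    · subst hc; simp only [pvSp, if_pos]
      refine ⟨by simp, ?_⟩
      intro p hp
      rcases List.mem_cons.mp hp with h | h
      · subst h; exact ih.1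
      · exact ih.2 p h
    · simp only [pvSp, if_neg hc]
      exact ⟨by simp [ih.1]; exact fun hh => absurd hh.symm hc, ih.2⟩

lemma pvJoinParts (v : List Char) : PySem.Chars.join ['.'] (pvParts v) = v := by
  induction v with
  | nil => simp [pvParts, pvSp, PySem.Chars.join_singleton]
  | cons c rest ih =>
    by_cases hc : c = '.'
    · simp only [pvParts, pvSp, if_pos hc]
      rw [PySem.Chars.join_cons_cons]
      subst hc; simpa using ih
    · simp only [pvParts, pvSp, if_neg hc]
      cases h2 : (pvSp rest).2 with
      | nil =>
        rw [PySem.Chars.join_singleton]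
        have := ih; rw [pvParts, h2, PySem.Chars.join_singleton] at this
        simp [this]
      | cons q t =>
        rw [PySem.Chars.join_cons_cons]
        have := ih; rw [pvParts, h2, PySem.Chars.join_cons_cons] at this
        simpa using this


def pvWild (v : List Char) (k : Nat) : List Char := PySem.Chars.join ['.'] ((pvParts v).take k) ++ ['.', '*']
def pvWildStr (violation : String) (k : Nat) : String := String.ofList (pvWild violation.toList k)

def pvChoose (P : Nat → Bool) : Nat → Option Nat
  | 0 => none
  | m+1 => if P m then some m else pvChoose P m

lemma pvChoose_some {P : Nat → Bool} : ∀ {m k : Nat}, pvChoose P m = some k →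
    P k = true ∧ k < m ∧ ∀ j, k < j → j < m → P j = false := by
  intro m
  induction m with
  | zero => intro k h; simp [pvChoose] at h
  | succ m ih =>
    intro k h
    by_cases hp : P m = true
    · simp [pvChoose, hp] at h
      subst h
      exact ⟨hp, by omega, fun j h1 h2 => by omega⟩
    · simp [pvChoose, hp] at h
      obtain ⟨h1, h2, h3⟩ := ih h
      refine ⟨h1, by omega, fun j hj1 hj2 => ?_⟩
      by_cases hj : j = m
      · subst hj; simpa using hp
      · exact h3 j hj1 (by omega)

lemma pvChoose_none {P : Nat → Bool} : ∀ {m : Nat}, pvChoose P m = none → ∀ j < m, P j = false := by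
  intro m
  induction m with
  | zero => intro _ j hj; omega
  | succ m ih =>
    intro h j hj
    by_cases hp : P m = true
    · simp [pvChoose, hp] at h
    · simp [pvChoose, hp] at h
      by_cases hjm : j = m
      · subst hjm; simpa using hp
      · exact ih h j (by omega)

lemma pvDropLastTake {α : Type} (l : List α) (m : Nat) (h : m + 1 ≤ l.length) :
    (l.take (m+1)).dropLast = l.take m := by
  rcases Nat.lt_or_ge (m+1) l.length with hlt | hge
  · rw [List.dropLast_take hlt]; simp
  · have hlen : l.length = m + 1 := by omega
    rw [List.take_of_length_le (by omega), List.dropLast_eq_take, hlen]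
    simp

def pvP (allowed : List String) (violation : String) (k : Nat) : Bool :=
  allowed.contains (pvWildStr violation k)

lemma pvDotStar_toList : (".*" : String).toList = ['.', '*'] := by decide

lemma pvWildcard_eq (ps : List (List Char)) :
    PySem.Str.join "." (ps.map String.ofList) ++ ".*" = String.ofList (PySem.Chars.join ['.'] ps ++ ['.', '*']) := by
  rw [← String.toList_inj]
  rw [String.toList_append, PySem.Str.toList_join, pvDotStar_toList, String.toList_ofList]
  rw [String.toList_ofList, List.map_map]
  have : List.map (String.toList ∘ String.ofList) ps = ps := by
    simpa using List.map_congr_left (l := ps) (f := String.toList ∘ String.ofList) (g := id) (fun a _ => by simp)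
  rw [this]

lemma pvAWhile_eq (allowed : List String) (violation : String) :
    ∀ (m : Nat), m ≤ (pvParts violation.toList).length →
    pvAWhile allowed (((pvParts violation.toList).take m).map String.ofList) =
      (pvChoose (pvP allowed violation) m).map (pvWildStr violation) := by
  intro m
  induction m with
  | zero => intro _; simp [pvAWhile, pvChoose]
  | succ m ih =>
    intro hm
    have hne : ((pvParts violation.toList).take (m+1)).map String.ofList ≠ [] := by
      simp [pvParts]
    rw [pvAWhile]
    rw [dif_neg hne]
    have hslice : PySem.List.slice (((pvParts violation.toList).take (m+1)).map String.ofList) none (some (-1))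
        = ((pvParts violation.toList).take m).map String.ofList := by
      rw [PySem.List.slice_to_neg_one, ← List.map_dropLast, pvDropLastTake _ _ hm]
    rw [hslice]
    have hwc : PySem.Str.join "." (((pvParts violation.toList).take m).map String.ofList) ++ ".*"
        = pvWildStr violation m := pvWildcard_eq _
    rw [hwc]
    by_cases hp : pvP allowed violation m = true
    · rw [if_pos (show allowed.contains (pvWildStr violation m) = true from hp), pvChoose, if_pos hp]
      rfl
    · rw [if_neg (show ¬ allowed.contains (pvWildStr violation m) = true from hp), pvChoose, if_neg hp]
      exact ih (by omega)

lemma pvA_eq (allowed : List String) (violation : String) :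
    get_rule_for_violation allowed violation =
      match pvChoose (pvP allowed violation) (pvParts violation.toList).length with
      | some k => some (pvWildStr violation k)
      | none => if allowed.contains violation then some violation else none := by
  unfold get_rule_for_violation
  have hsplit : (PySem.Str.split? violation ".").getD [] = (pvParts violation.toList).map String.ofList := by
    rw [PySem.Str.split?]
    have : PySem.Chars.split? violation.toList (".".toList) =
        some (PySem.Chars.splitOn violation.toList ['.']) := by
      rw [show (".".toList) = ['.'] by decide]
      simp [PySem.Chars.split?]
    rw [this]
    simp [pvSplitOn_eq]
  rw [hsplit]
  have := pvAWhile_eq allowed violation (pvParts violation.toList).length (le_refl _)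
  rw [List.take_length] at this
  rw [this]
  cases pvChoose (pvP allowed violation) (pvParts violation.toList).length <;> simp


-- ---- B-side characterization ----
def pvStem (r : String) : String := PySem.Str.slice r none (some (-2))

def pvIsMatch (violation r : String) : Bool :=
  PySem.Str.endswith r ".*" && (decide (pvStem r = "") || PySem.Str.startswith violation (pvStem r ++ "."))

set_option maxHeartbeats 1000000 in
lemma pvBStep_eq (violation : String) (b : Option String) (r : String) :
    pvBStep violation b r =
      if pvIsMatch violation r = true then
        match b with
        | none => some (pvStem r)
        | some s => if PySem.Str.len s < PySem.Str.len (pvStem r) then some (pvStem r) else some s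
      else b := by
  unfold pvBStep pvIsMatch pvStem
  by_cases h1 : PySem.Str.endswith r ".*" = true <;>
    by_cases h2 : PySem.Str.slice r none (some (-2)) = "" <;>
      by_cases h3 : PySem.Str.startswith violation (PySem.Str.slice r none (some (-2)) ++ ".") = true <;>
        cases b <;> simp_all

def pvGood (violation : String) (seen : List String) (b : Option String) : Prop :=
  match b with
  | none => ∀ r ∈ seen, pvIsMatch violation r = false
  | some s => (∃ r ∈ seen, pvIsMatch violation r = true ∧ pvStem r = s) ∧
      ∀ r ∈ seen, pvIsMatch violation r = true → PySem.Str.len (pvStem r) ≤ PySem.Str.len s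

set_option maxHeartbeats 2000000 in
lemma pvGood_step (violation : String) (seen : List String) (b : Option String) (r : String)
    (h : pvGood violation seen b) : pvGood violation (seen ++ [r]) (pvBStep violation b r) := by
  rw [pvBStep_eq]
  by_cases hm : pvIsMatch violation r = true
  · rw [if_pos hm]
    cases b with
    | none =>
      simp only [pvGood] at h ⊢
      refine ⟨⟨r, by simp, hm, rfl⟩, ?_⟩
      intro r' hr' hmr'
      rcases List.mem_append.mp hr' with h1 | h1
      · rw [h r' h1] at hmr'; exact absurd hmr' (by simp)
      · simp only [List.mem_singleton] at h1; subst h1; exact le_refl _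
    | some s =>
      simp only [pvGood] at h
      obtain ⟨⟨r0, hr0, hm0, hs0⟩, hmax⟩ := h
      change pvGood violation (seen ++ [r])
        (if PySem.Str.len s < PySem.Str.len (pvStem r) then some (pvStem r) else some s)
      by_cases hlt : PySem.Str.len s < PySem.Str.len (pvStem r)
      · rw [if_pos hlt]
        simp only [pvGood]
        refine ⟨⟨r, by simp, hm, rfl⟩, ?_⟩
        intro r' hr' hmr'
        rcases List.mem_append.mp hr' with h1 | h1
        · exact le_of_lt (lt_of_le_of_lt (hmax r' h1 hmr') hlt)
        · simp only [List.mem_singleton] at h1; subst h1; exact le_refl _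
      · rw [if_neg hlt]
        simp only [pvGood]
        refine ⟨⟨r0, List.mem_append_left _ hr0, hm0, hs0⟩, ?_⟩
        intro r' hr' hmr'
        rcases List.mem_append.mp hr' with h1 | h1
        · exact hmax r' h1 hmr'
        · simp only [List.mem_singleton] at h1; subst h1; omega
  · rw [if_neg hm]
    cases b with
    | none =>
      simp only [pvGood] at h ⊢
      intro r' hr'
      rcases List.mem_append.mp hr' with h1 | h1
      · exact h r' h1
      · simp only [List.mem_singleton] at h1; subst h1; simpa using hm
    | some s =>
      simp only [pvGood] at h ⊢
      obtain ⟨⟨r0, hr0, hm0, hs0⟩, hmax⟩ := h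
      refine ⟨⟨r0, List.mem_append_left _ hr0, hm0, hs0⟩, ?_⟩
      intro r' hr' hmr'
      rcases List.mem_append.mp hr' with h1 | h1
      · exact hmax r' h1 hmr'
      · simp only [List.mem_singleton] at h1; subst h1; exact absurd hmr' hm

lemma pvGood_fold (violation : String) : ∀ (l seen : List String) (b : Option String),
    pvGood violation seen b → pvGood violation (seen ++ l) (l.foldl (pvBStep violation) b) := by
  intro l
  induction l with
  | nil => intro seen b h; simpa using h
  | cons r t ih =>
    intro seen b h
    have := ih (seen ++ [r]) (pvBStep violation b r) (pvGood_step violation seen b r h)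
    simpa [List.append_assoc] using this

lemma pvGood_final (violation : String) (allowed : List String) :
    pvGood violation allowed (allowed.foldl (pvBStep violation) none) := by
  simpa using pvGood_fold violation allowed [] none (by simp [pvGood])

-- ---- join/take facts ----
lemma pvJoinTakeDrop : ∀ (ps : List (List Char)) (k : Nat), 1 ≤ k → k < ps.length →
    PySem.Chars.join ['.'] ps =
      PySem.Chars.join ['.'] (ps.take k) ++ ['.'] ++ PySem.Chars.join ['.'] (ps.drop k) := by
  intro ps
  induction ps with
  | nil => intro k h1 h2; simp at h2
  | cons p rest ih =>
    intro k h1 h2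
    match k, h1 with
    | 1, _ =>
      cases rest with
      | nil => simp at h2
      | cons q t =>
        rw [PySem.Chars.join_cons_cons]
        simp [PySem.Chars.join_singleton, List.append_assoc]
    | (k'+2), _ =>
      cases rest with
      | nil => simp at h2
      | cons q t =>
        rw [PySem.Chars.join_cons_cons]
        rw [ih (k'+1) (by omega) (by simp at h2 ⊢; omega)]
        simp only [List.take_succ_cons, List.drop_succ_cons]
        rw [PySem.Chars.join_cons_cons]
        simp [List.append_assoc]

lemma pvJoinTakeStep : ∀ (ps : List (List Char)) (j : Nat),
    PySem.Chars.join ['.'] (ps.take j) <+: PySem.Chars.join ['.'] (ps.take (j+1)) := by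
  intro ps
  induction ps with
  | nil => intro j; simp
  | cons p rest ih =>
    intro j
    cases j with
    | zero => simp [PySem.Chars.join_nil]
    | succ j' =>
      rw [List.take_succ_cons, List.take_succ_cons]
      cases rest with
      | nil => simp
      | cons r0 rs =>
        cases j' with
        | zero =>
          rw [List.take_zero, PySem.Chars.join_singleton, List.take_succ_cons,
            PySem.Chars.join_cons_cons]
          rw [List.append_assoc]
          exact List.prefix_append _ _
        | succ j'' =>
          rw [List.take_succ_cons, List.take_succ_cons, PySem.Chars.join_cons_cons,
            PySem.Chars.join_cons_cons]
          rw [List.append_assoc, List.append_assoc]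
          apply (List.prefix_append_right_inj p).mpr
          apply (List.prefix_append_right_inj ['.']).mpr
          have := ih (j''+1)
          rw [List.take_succ_cons, List.take_succ_cons] at this
          exact this

lemma pvJoinTakeMono (ps : List (List Char)) (j k : Nat) (h : j ≤ k) :
    PySem.Chars.join ['.'] (ps.take j) <+: PySem.Chars.join ['.'] (ps.take k) := by
  induction k with
  | zero => have : j = 0 := by omega
            subst this; exact List.prefix_rfl
  | succ k' ih =>
    by_cases hj : j = k' + 1
    · subst hj; exact List.prefix_rfl
    · exact (ih (by omega)).trans (pvJoinTakeStep ps k')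

lemma pvJoinTakePrefixV (v : List Char) (k : Nat) :
    PySem.Chars.join ['.'] ((pvParts v).take k) <+: v := by
  by_cases hle : k ≤ (pvParts v).length
  · have := pvJoinTakeMono (pvParts v) k (pvParts v).length hle
    rwa [List.take_length, pvJoinParts] at this
  · rw [List.take_of_length_le (by omega), pvJoinParts]

lemma pvBoundary : ∀ (ps : List (List Char)), (∀ p ∈ ps, '.' ∉ p) → ∀ (stem : List Char),
    stem ++ ['.'] <+: PySem.Chars.join ['.'] ps →
    ∃ k, 1 ≤ k ∧ k < ps.length ∧ stem = PySem.Chars.join ['.'] (ps.take k) := by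
  intro ps
  induction ps with
  | nil =>
    intro _ stem h
    rw [PySem.Chars.join_nil] at h
    have := h.length_le
    simp at this
  | cons p rest ih =>
    intro hnd stem h
    cases rest with
    | nil =>
      rw [PySem.Chars.join_singleton] at h
      have hdot : '.' ∈ p := h.subset (by simp)
      exact absurd hdot (hnd p (by simp))
    | cons q t =>
      rw [PySem.Chars.join_cons_cons] at h
      have hpfx : p <+: p ++ ['.'] ++ PySem.Chars.join ['.'] (q :: t) := by
        rw [List.append_assoc]; exact List.prefix_append _ _
      rcases lt_trichotomy stem.length p.length with hl | hl | hl
      · have hsp : stem ++ ['.'] <+: p :=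
          List.prefix_of_prefix_length_le h hpfx (by simp; omega)
        have hdot : '.' ∈ p := hsp.subset (by simp)
        exact absurd hdot (hnd p (by simp))
      · have hsv : stem <+: p ++ ['.'] ++ PySem.Chars.join ['.'] (q :: t) :=
          (List.prefix_append stem ['.']).trans h
        have hse : stem = p :=
          List.IsPrefix.eq_of_length (List.prefix_of_prefix_length_le hsv hpfx (le_of_eq hl)) hl
        refine ⟨1, le_refl 1, by simp, ?_⟩
        rw [List.take_succ_cons, List.take_zero, PySem.Chars.join_singleton, hse]
      · have hsv : stem <+: p ++ ['.'] ++ PySem.Chars.join ['.'] (q :: t) :=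
          (List.prefix_append stem ['.']).trans h
        have hps : p <+: stem := List.prefix_of_prefix_length_le hpfx hsv (le_of_lt hl)
        obtain ⟨s2, rfl⟩ := hps
        have h2 : s2 ++ ['.'] <+: ['.'] ++ PySem.Chars.join ['.'] (q :: t) := by
          apply (List.prefix_append_right_inj p).mp
          simpa [List.append_assoc] using h
        cases s2 with
        | nil => simp at hl
        | cons c s3 =>
          obtain ⟨hc, h3⟩ := List.cons_prefix_cons.mp (by simpa using h2)
          obtain ⟨k', hk1, hk2, hk3⟩ := ih (fun x hx => hnd x (List.mem_cons_of_mem p hx)) s3 h3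
          refine ⟨k'+1, by omega, by simp at hk2 ⊢; omega, ?_⟩
          rw [List.take_succ_cons]
          match k', hk1 with
          | (k''+1), _ =>
            rw [List.take_succ_cons] at hk3 ⊢
            rw [PySem.Chars.join_cons_cons]
            rw [← hk3, hc]
            simp


lemma pvNoDotParts (v : List Char) : ∀ p ∈ pvParts v, '.' ∉ p := by
  intro p hp
  rcases List.mem_cons.mp hp with h | h
  · subst h; exact (pvNoDot v).1
  · exact (pvNoDot v).2 p h

lemma pvStem_wildStr (violation : String) (k : Nat) :
    pvStem (pvWildStr violation k) =
      String.ofList (PySem.Chars.join ['.'] ((pvParts violation.toList).take k)) := by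
  unfold pvStem pvWildStr pvWild
  rw [← String.toList_inj, PySem.Str.toList_slice, PySem.Chars.slice_eq_listSlice,
    String.toList_ofList, String.toList_ofList,
    PySem.List.slice_to_neg_ofNat _ 2 (by omega)]
  have hl : (PySem.Chars.join ['.'] ((pvParts violation.toList).take k) ++ ['.', '*']).length - 2
      = (PySem.Chars.join ['.'] ((pvParts violation.toList).take k)).length := by simp
  rw [hl]
  exact List.take_left' rfl

lemma pvMatch_iff (violation r : String) :
    pvIsMatch violation r = true ↔
      ∃ k, k < (pvParts violation.toList).length ∧ r = pvWildStr violation k := by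
  unfold pvIsMatch
  simp only [Bool.and_eq_true, Bool.or_eq_true, decide_eq_true_eq]
  constructor
  · rintro ⟨hE, hOr⟩
    have hsuf : (".*" : String).toList <:+ r.toList := by
      rw [PySem.Str.endswith_eq] at hE
      exact (PySem.Chars.endswith_iff _ _).mp hE
    rw [pvDotStar_toList] at hsuf
    obtain ⟨pre, hpre⟩ := hsuf
    have hstem : (pvStem r).toList = pre := by
      unfold pvStem
      rw [PySem.Str.toList_slice, PySem.Chars.slice_eq_listSlice,
        PySem.List.slice_to_neg_ofNat _ 2 (by omega), ← hpre]
      have hl : (pre ++ ['.', '*']).length - 2 = pre.length := by simp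
      rw [hl]
      exact List.take_left' rfl
    rcases hOr with hA | hB
    · refine ⟨0, by simp [pvParts], ?_⟩
      have hpe : pre = [] := by
        rw [← hstem, hA]; decide
      rw [← String.ofList_toList (s := r), ← hpre, hpe]
      unfold pvWildStr pvWild
      rw [List.take_zero, PySem.Chars.join_nil]
    · have hpfx : pre ++ ['.'] <+: violation.toList := by
        rw [PySem.Str.startswith_eq] at hB
        have := (PySem.Chars.startswith_iff _ _).mp hB
        rwa [String.toList_append, hstem, show ("." : String).toList = ['.'] from by decide] at this
      obtain ⟨k, _, hk2, hk3⟩ := pvBoundary (pvParts violation.toList)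
        (pvNoDotParts violation.toList) pre (by rwa [pvJoinParts])
      refine ⟨k, hk2, ?_⟩
      rw [← String.ofList_toList (s := r), ← hpre, hk3]
      rfl
  · rintro ⟨k, hk, rfl⟩
    have htl : (pvWildStr violation k).toList =
        PySem.Chars.join ['.'] ((pvParts violation.toList).take k) ++ ['.', '*'] := by
      unfold pvWildStr pvWild
      exact String.toList_ofList
    refine ⟨?_, ?_⟩
    · rw [PySem.Str.endswith_eq]
      apply (PySem.Chars.endswith_iff _ _).mpr
      rw [pvDotStar_toList, htl]
      exact List.suffix_append _ _
    · rcases Nat.eq_zero_or_pos k with hk0 | hkpos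
      · left
        subst hk0
        rw [pvStem_wildStr, List.take_zero, PySem.Chars.join_nil]
      · right
        rw [PySem.Str.startswith_eq]
        apply (PySem.Chars.startswith_iff _ _).mpr
        rw [String.toList_append, pvStem_wildStr, String.toList_ofList,
          show ("." : String).toList = ['.'] from by decide]
        have hd := pvJoinTakeDrop (pvParts violation.toList) k hkpos hk
        rw [pvJoinParts] at hd
        have hp : PySem.Chars.join ['.'] ((pvParts violation.toList).take k) ++ ['.'] <+:
            (PySem.Chars.join ['.'] ((pvParts violation.toList).take k) ++ ['.']) ++
              PySem.Chars.join ['.'] ((pvParts violation.toList).drop k) :=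
          List.prefix_append _ _
        rwa [← hd] at hp

-- ===== VERDICT (by name: the statement is the Claim_ definition above) =====
theorem get_rule_for_violation_spec : Claim_equal_get_rule_for_violation := by
  intro allowed violation _
  unfold Spec_get_rule_for_violation
  rw [pvA_eq]
  unfold get_rule_for_violation_alt
  have hgood := pvGood_final violation allowed
  cases hch : pvChoose (pvP allowed violation) (pvParts violation.toList).length with
  | none =>
    have hnone : allowed.foldl (pvBStep violation) none = none := by
      cases hf : allowed.foldl (pvBStep violation) none with
      | none => rfl
      | some s =>
        rw [hf] at hgood
        obtain ⟨⟨r0, hr0, hm0, _⟩, _⟩ := hgood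
        obtain ⟨k0, hk0, hr0eq⟩ := (pvMatch_iff violation r0).mp hm0
        have hP : pvP allowed violation k0 = true := by
          unfold pvP; rw [← hr0eq]; exact List.elem_eq_true_of_mem hr0
        rw [pvChoose_none hch k0 hk0] at hP
        exact absurd hP (by simp)
    rw [hnone]
  | some K =>
    obtain ⟨hPK, hKlt, hKmax⟩ := pvChoose_some hch
    have hmemK : pvWildStr violation K ∈ allowed := List.mem_of_elem_eq_true hPK
    have hmK : pvIsMatch violation (pvWildStr violation K) = true :=
      (pvMatch_iff violation _).mpr ⟨K, hKlt, rfl⟩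
    cases hf : allowed.foldl (pvBStep violation) none with
    | none =>
      rw [hf] at hgood
      rw [hgood _ hmemK] at hmK
      exact absurd hmK (by simp)
    | some s =>
      rw [hf] at hgood
      obtain ⟨⟨r0, hr0, hm0, hs0⟩, hmax⟩ := hgood
      obtain ⟨k0, hk0lt, hr0eq⟩ := (pvMatch_iff violation r0).mp hm0
      have hP0 : pvP allowed violation k0 = true := by
        unfold pvP; rw [← hr0eq]; exact List.elem_eq_true_of_mem hr0
      have hk0K : k0 ≤ K := by
        by_contra hgt
        rw [hKmax k0 (by omega) hk0lt] at hP0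
        exact absurd hP0 (by simp)
      have hstl : s.toList = PySem.Chars.join ['.'] ((pvParts violation.toList).take k0) := by
        rw [← hs0, hr0eq, pvStem_wildStr, String.toList_ofList]
      have hlen1 : s.toList.length ≤
          (PySem.Chars.join ['.'] ((pvParts violation.toList).take K)).length := by
        rw [hstl]
        exact (pvJoinTakeMono _ k0 K hk0K).length_le
      have hlen2 : (PySem.Chars.join ['.'] ((pvParts violation.toList).take K)).length ≤
          s.toList.length := by
        have hx := hmax _ hmemK hmK
        rw [pvStem_wildStr, PySem.Str.len_eq, PySem.Str.len_eq, String.toList_ofList] at hx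
        exact_mod_cast hx
      have heq : s.toList = PySem.Chars.join ['.'] ((pvParts violation.toList).take K) := by
        apply List.IsPrefix.eq_of_length
        · apply List.prefix_of_prefix_length_le ?_ (pvJoinTakePrefixV violation.toList K) hlen1
          rw [hstl]
          exact pvJoinTakePrefixV violation.toList k0
        · omega
      have hfin : s ++ ".*" = pvWildStr violation K := by
        rw [← String.toList_inj, String.toList_append, heq, pvDotStar_toList]
        unfold pvWildStr pvWild
        rw [String.toList_ofList]
      show some (pvWildStr violation K) = some (s ++ ".*")
      rw [hfin]
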